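-- pv_equiv track=rewrite | github.com/a-rium/elite4 | e4/__init__.py | parse_attribute_value
-- ===== SOURCE A (Python) =====
-- def parse_attribute_value(text: str, at: int) -> tuple[str, int, bool]:
--     current = at
--     ok = False
--     quote = text[at]
--     if quote in ['"', "'"]:
--         not_allowed_chars = f'<&{quote}'
--
--         current += 1
--         while current < len(text):
--             if text[current] in not_allowed_chars:
--                 ok = text[current] == quote
--                 current += 1
--                 break
--             current += 1
--     return text[at:current], current, ok
-- ===== SOURCE B (Python) =====
-- def parse_attribute_value(text: str, at: int) -> tuple[str, int, bool]:
--     quote = text[at]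
--     if quote not in ('"', "'"):
--         return '', at, False
--     hits = [p for p in (text.find('<', at + 1),
--                         text.find('&', at + 1),
--                         text.find(quote, at + 1)) if p != -1]
--     if not hits:
--         current = len(text)
--         ok = False
--     else:
--         i = min(hits)
--         current = i + 1
--         ok = (i == text.find(quote, at + 1))
--     return text[at:current], current, ok
-- ===== Notes on version B (the rewrite author's own statement) =====
-- stated objective: alternative
-- what changed: Replaces A's manual per-character while-loop over the text with three str.find substring searches and a minimum over the hits to locate the terminating delimiter.
-- intended difference: For positions at < -1 that wrap onto a quote character, A keeps scanning with raw negative indices, wrapping to the end of the string and rescanning it from the start (A("'a'", -3) = ('', 0, True)); B scans forward from the wrapped position and returns ("'a'", 3, True), the intended parse of the quoted value. — e.g. on parse_attribute_value("'a'", -3): A returns ("", 0, true), B returns ("'a'", 3, true)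
import Mathlib
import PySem

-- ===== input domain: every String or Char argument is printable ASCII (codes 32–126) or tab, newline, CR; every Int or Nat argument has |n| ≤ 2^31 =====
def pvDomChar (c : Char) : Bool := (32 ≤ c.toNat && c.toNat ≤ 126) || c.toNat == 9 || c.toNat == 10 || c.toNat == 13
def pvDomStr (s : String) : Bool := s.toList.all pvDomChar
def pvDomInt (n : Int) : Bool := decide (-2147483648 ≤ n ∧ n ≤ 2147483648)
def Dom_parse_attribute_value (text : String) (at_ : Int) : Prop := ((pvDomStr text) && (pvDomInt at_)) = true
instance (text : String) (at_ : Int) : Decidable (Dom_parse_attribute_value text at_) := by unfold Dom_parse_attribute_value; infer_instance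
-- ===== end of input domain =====

-- B replaces A's manual per-character while-loop with three substring searches (str.find)
-- and a minimum over the hits; equivalence is proved outside D_ (positions at_ < -1 that
-- wrap onto a quote character, where A's raw negative indices make the scan rescan the start).

-- ===== PORT A =====
-- the 'while current < len(text)' scan; fuel = number of remaining iterations
def pavLoop (cs : List Char) (quote : Char) (cur : Int) : Nat → Int × Bool
  | 0 => (cur, false)
  | f + 1 =>
    match PySem.List.pyGet? cs cur with
    | none => (cur, false)   -- unreachable inside Pre_: -len < cur < len throughout the loop
    | some c =>
      if c ∈ ['<', '&', quote] then (cur + 1, c == quote)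
      else pavLoop cs quote (cur + 1) f

def parse_attribute_value (text : String) (at_ : Int) : String × Int × Bool :=
  match PySem.Str.pyGet? text at_ with
  | none => ("", at_, false)   -- Python raises IndexError here; excluded by Pre_
  | some quote =>
    if quote ∈ ['"', '\''] then
      let r := pavLoop text.toList quote (at_ + 1) ((PySem.Str.len text - (at_ + 1)).toNat)
      (PySem.Str.slice text (some at_) (some r.1), r.1, r.2)
    else
      (PySem.Str.slice text (some at_) (some at_), at_, false)

-- ===== PORT B =====
def parse_attribute_value_alt (text : String) (at_ : Int) : String × Int × Bool :=
  match PySem.Str.pyGet? text at_ with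
  | none => ("", at_, false)   -- Python raises IndexError here; excluded by Pre_
  | some quote =>
    if quote ∈ ['"', '\''] then
      let p1 := PySem.Str.findFrom text "<" (at_ + 1)
      let p2 := PySem.Str.findFrom text "&" (at_ + 1)
      let p3 := PySem.Str.findFrom text (String.singleton quote) (at_ + 1)
      let hits := [p1, p2, p3].filter (fun p => p != -1)
      match PySem.List.min? hits (fun x => x) with
      | none => (PySem.Str.slice text (some at_) (some (PySem.Str.len text)), PySem.Str.len text, false)
      | some i => (PySem.Str.slice text (some at_) (some (i + 1)), i + 1, i == p3)
    else
      ("", at_, false)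

-- ===== PRECONDITION & SPEC =====
-- Pre_ excludes exactly the inputs where Python's text[at] raises IndexError: at outside [-len, len).
def Pre_parse_attribute_value (text : String) (at_ : Int) : Prop :=
  -(PySem.Str.len text) ≤ at_ ∧ at_ < PySem.Str.len text
instance (text : String) (at_ : Int) : Decidable (Pre_parse_attribute_value text at_) := by
  unfold Pre_parse_attribute_value; infer_instance

def pvWitness_parse_attribute_value : String × Int := ("'a'", 0)

-- For positions at_ < -1 that wrap onto a quote character, A keeps scanning with raw negative
-- indices, so it wraps to the end of the string and rescans it from the start, returning an
-- accidental slice/index (e.g. A("'a'", -3) = ('', 0, True)); B scans forward from the wrapped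
-- position and returns ("'a'", 3, True), the intended parse of the quoted value.
def D_parse_attribute_value (text : String) (at_ : Int) : Prop :=
  at_ < -1 ∧ (PySem.Str.pyGet? text at_ = some '"' ∨ PySem.Str.pyGet? text at_ = some '\'')
instance (text : String) (at_ : Int) : Decidable (D_parse_attribute_value text at_) := by
  unfold D_parse_attribute_value; infer_instance

def Spec_parse_attribute_value (text : String) (at_ : Int) (out : String × Int × Bool) : Prop :=
  ¬ D_parse_attribute_value text at_ → out = parse_attribute_value_alt text at_
instance (text : String) (at_ : Int) (out : String × Int × Bool) : Decidable (Spec_parse_attribute_value text at_ out) := by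
  unfold Spec_parse_attribute_value; infer_instance

def pvDiffWitness_parse_attribute_value : String × Int := ("'a'", -3)
def pvDiffWitnessOut_parse_attribute_value : (String × Int × Bool) × (String × Int × Bool) :=
  (("", 0, true), ("'a'", 3, true))

-- ===== CLAIM (what is proved, stated in full; the proofs are below) =====
def Claim_unchanged_parse_attribute_value : Prop := ∀ (text : String) (at_ : Int), Dom_parse_attribute_value text at_ → Pre_parse_attribute_value text at_ → Spec_parse_attribute_value text at_ (parse_attribute_value text at_)
def Claim_changed_parse_attribute_value : Prop := Dom_parse_attribute_value (pvDiffWitness_parse_attribute_value.1) (pvDiffWitness_parse_attribute_value.2) ∧ Pre_parse_attribute_value (pvDiffWitness_parse_attribute_value.1) (pvDiffWitness_parse_attribute_value.2) ∧ D_parse_attribute_value (pvDiffWitness_parse_attribute_value.1) (pvDiffWitness_parse_attribute_value.2) ∧ parse_attribute_value (pvDiffWitness_parse_attribute_value.1) (pvDiffWitness_parse_attribute_value.2) = pvDiffWitnessOut_parse_attribute_value.1 ∧ parse_attribute_value_alt (pvDiffWitness_parse_attribute_value.1) (pvDiffWitness_parse_attribute_value.2) = pvDiffWitnessOut_parse_attribute_value.2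 ∧ pvDiffWitnessOut_parse_attribute_value.1 ≠ pvDiffWitnessOut_parse_attribute_value.2
def Claim_exact_parse_attribute_value : Prop := ∀ (text : String) (at_ : Int), Dom_parse_attribute_value text at_ → Pre_parse_attribute_value text at_ → D_parse_attribute_value text at_ → parse_attribute_value text at_ ≠ parse_attribute_value_alt text at_

-- ===== LEMMAS AND PROOFS =====

-- [c] is a prefix of t iff t starts with c
theorem pavSingleton_prefix (c : Char) (t : List Char) : [c] <+: t ↔ t.head? = some c := by
  cases t with
  | nil => simp
  | cons x xs =>
    constructor
    · rintro ⟨u, hu⟩; simp_all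
    · intro h; simp at h; exact ⟨xs, by simp [h]⟩

-- single-character find = first index of that character
theorem pavFind_single (d : List Char) (c : Char) :
    PySem.Chars.find d [c] =
      match List.findIdx? (fun x => x == c) d with
      | none => -1
      | some k => (k : Int) := by
  cases h : List.findIdx? (fun x => x == c) d with
  | none =>
    have hnm : c ∉ d := by
      intro hm
      have := List.findIdx?_eq_none_iff.mp h c hm
      simp at this
    have : ¬ [c] <:+: d := by
      intro hinf
      exact hnm (List.singleton_sublist.mp hinf.sublist)
    simpa using (PySem.Chars.find_eq_neg_one_iff d [c]).mpr this
  | some k =>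
    obtain ⟨hklt, hpk, hminp⟩ := List.findIdx?_eq_some_iff_getElem.mp h
    have hdk : d[k] = c := by simpa using hpk
    have hmin : ∀ j < k, ¬ d[j]? = some c := by
      intro j hj hc
      have hjlt : j < d.length := by
        by_contra hh
        simp [List.getElem?_eq_none (le_of_not_gt hh)] at hc
      have := hminp j hj
      simp [List.getElem?_eq_getElem hjlt] at hc
      simp [hc] at this
    have hinf : [c] <:+: d := by
      have : c ∈ d := hdk ▸ d.getElem_mem hklt
      obtain ⟨u, v, huv⟩ := List.append_of_mem this
      exact ⟨u, v, by simp [huv]⟩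
    have hne : PySem.Chars.find d [c] ≠ -1 := by
      rw [Ne, PySem.Chars.find_eq_neg_one_iff]; simpa using hinf
    have hge : 0 ≤ PySem.Chars.find d [c] := by
      have := PySem.Chars.neg_one_le_find d [c]; omega
    obtain ⟨hpre, hminf⟩ := PySem.Chars.find_spec (s := d) (sub := [c]) hge
    set i := (PySem.Chars.find d [c]).toNat with hi
    have hdi : d[i]? = some c := by
      have := (pavSingleton_prefix c (d.drop i)).mp hpre
      simpa [List.head?_drop] using this
    have hik : i = k := by
      by_contra hne2
      rcases lt_or_gt_of_ne hne2 with hlt | hgt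
      · exact hmin i hlt hdi
      · exact hminf k hgt ((pavSingleton_prefix c (d.drop k)).mpr
          (by simpa [List.head?_drop, List.getElem?_eq_getElem hklt] using congrArg some hdk))
    show PySem.Chars.find d [c] = (k : Int)
    omega

theorem pavFind_eq_none (d : List Char) (c : Char)
    (h : List.findIdx? (fun x => x == c) d = none) : PySem.Chars.find d [c] = -1 := by
  rw [pavFind_single, h]

theorem pavFind_eq_some (d : List Char) (c : Char) (k : Nat)
    (h : List.findIdx? (fun x => x == c) d = some k) : PySem.Chars.find d [c] = (k : Int) := by
  rw [pavFind_single, h]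

-- min? over the filtered three hits, when m is among them and is a lower bound
theorem pavMinFilter3 (p1 p2 p3 m : Int) (hm : 0 ≤ m)
    (h : p1 = m ∨ p2 = m ∨ p3 = m)
    (h1 : p1 = -1 ∨ m ≤ p1) (h2 : p2 = -1 ∨ m ≤ p2) (h3 : p3 = -1 ∨ m ≤ p3) :
    PySem.List.min? ([p1, p2, p3].filter (fun p => p != -1)) (fun x => x) = some m := by
  cases hb1 : (p1 != -1) <;> cases hb2 : (p2 != -1) <;> cases hb3 : (p3 != -1) <;>
    simp only [List.filter_cons, List.filter_nil, hb1, hb2, hb3, if_true, Bool.false_eq_true, if_false] <;>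
    simp only [bne_iff_ne, bne_eq_false_iff_eq, ne_eq] at hb1 hb2 hb3 <;>
    (try rw [PySem.List.min?_id_cons]) <;> (try simp only [List.foldl, Option.some.injEq]) <;> omega

theorem pavMinFilter3_none (p1 p2 p3 : Int)
    (h1 : p1 = -1) (h2 : p2 = -1) (h3 : p3 = -1) :
    PySem.List.min? ([p1, p2, p3].filter (fun p => p != -1)) (fun x => x) = none := by
  subst h1 h2 h3; rfl

-- loop characterisation: scanning from a non-negative start s finds the first delimiter index
theorem pavLoop_eq (cs : List Char) (q : Char) (s : Nat) (hs : s ≤ cs.length) :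
    pavLoop cs q (s : Int) (cs.length - s) =
      match List.findIdx? (fun c => decide (c ∈ ['<', '&', q])) (cs.drop s) with
      | none => ((cs.length : Int), false)
      | some k => ((s : Int) + (k : Int) + 1, (cs.drop s)[k]? == some q) := by
  generalize hf : cs.length - s = f
  induction f generalizing s with
  | zero =>
    have hsl : s = cs.length := by omega
    subst hsl
    simp [pavLoop, List.drop_length]
  | succ f ih =>
    have hslt : s < cs.length := by omega
    rw [List.drop_eq_getElem_cons hslt, List.findIdx?_cons]
    by_cases hp : cs[s] ∈ ['<', '&', q]
    · simp only [pavLoop, PySem.List.pyGet?_natCast, List.getElem?_eq_getElem hslt, hp,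
        decide_true, if_true]
      simp [List.getElem?_eq_getElem hslt]
    · have hstep : pavLoop cs q (s : Int) (f + 1) = pavLoop cs q ((s : Int) + 1) f := by
        simp [pavLoop, PySem.List.pyGet?_natCast, List.getElem?_eq_getElem hslt, hp]
      rw [hstep]
      have hcast : ((s : Int) + 1) = ((s + 1 : Nat) : Int) := by push_cast; ring
      rw [hcast, ih (s + 1) (by omega) (by omega)]
      simp only [hp, decide_false, Bool.false_eq_true, if_false]
      cases hidx : List.findIdx? (fun c => decide (c ∈ ['<', '&', q])) (cs.drop (s + 1)) with
      | none => simp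
      | some k =>
        simp only [Option.map_some, Prod.mk.injEq]
        refine ⟨by push_cast; ring, by rw [List.getElem?_cons_succ]⟩

-- B's find/min combination equals the loop, for a non-negative start s
theorem pavMain (cs : List Char) (q : Char) (s : Nat) (hs : s ≤ cs.length) :
    (let p1 := PySem.Chars.findFrom cs ['<'] (s : Int)
     let p2 := PySem.Chars.findFrom cs ['&'] (s : Int)
     let p3 := PySem.Chars.findFrom cs [q] (s : Int)
     match PySem.List.min? ([p1, p2, p3].filter (fun p => p != -1)) (fun x => x) with
     | none => ((cs.length : Int), false)
     | some i => (i + 1, i == p3)) = pavLoop cs q (s : Int) (cs.length - s) := by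
  rw [pavLoop_eq cs q s hs]
  simp only [PySem.Chars.findFrom_natCast cs _ s hs]
  cases hK : List.findIdx? (fun c => decide (c ∈ ['<', '&', q])) (cs.drop s) with
  | none =>
    have hall := List.findIdx?_eq_none_iff.mp hK
    have hone : ∀ c : Char, c ∈ ['<', '&', q] →
        PySem.Chars.find (cs.drop s) [c] = -1 := by
      intro c hc
      apply pavFind_eq_none
      rw [List.findIdx?_eq_none_iff]
      intro x hx
      by_contra hxc
      simp at hxc
      subst hxc
      have := hall x hx
      simp [hc] at this
    rw [pavMinFilter3_none _ _ _ (by simp [hone '<' (by simp)])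
      (by simp [hone '&' (by simp)]) (by simp [hone q (by simp)])]
  | some k =>
    obtain ⟨hklt, hPk, hmin⟩ := List.findIdx?_eq_some_iff_getElem.mp hK
    -- facts about the three single-character finds
    have key : ∀ c : Char, c ∈ ['<', '&', q] →
        (PySem.Chars.find (cs.drop s) [c] = -1 ∨ (k : Int) ≤ PySem.Chars.find (cs.drop s) [c]) ∧
        ((cs.drop s)[k]? = some c → PySem.Chars.find (cs.drop s) [c] = (k : Int)) ∧
        (PySem.Chars.find (cs.drop s) [c] = (k : Int) → (cs.drop s)[k]? = some c) := by
      intro c hc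
      cases hfc : List.findIdx? (fun x => x == c) (cs.drop s) with
      | none =>
        refine ⟨Or.inl (pavFind_eq_none _ _ hfc), ?_, ?_⟩
        · intro hdk
          have := List.findIdx?_eq_none_iff.mp hfc c (List.mem_of_getElem? hdk)
          simp at this
        · intro hfeq
          rw [pavFind_eq_none _ _ hfc] at hfeq
          omega
      | some j =>
        have hfj := pavFind_eq_some _ _ _ hfc
        obtain ⟨hjlt, hjc, hjmin⟩ := List.findIdx?_eq_some_iff_getElem.mp hfc
        have hjc' : (cs.drop s)[j] = c := by simpa using hjc
        have hkj : k ≤ j := by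
          by_contra hh
          have := hmin j (by omega)
          simp [hjc', hc] at this
        refine ⟨Or.inr (by rw [hfj]; exact_mod_cast hkj), ?_, ?_⟩
        · intro hdk
          have hdk' : (cs.drop s)[k] = c := by
            simpa [List.getElem?_eq_getElem hklt] using hdk
          have hjk : j ≤ k := by
            by_contra hh
            have := hjmin k (by omega)
            simp [hdk'] at this
          rw [hfj]
          exact_mod_cast congrArg Nat.cast (by omega : j = k)
        · intro hfeq
          rw [hfj] at hfeq
          have : j = k := by exact_mod_cast hfeq
          subst this
          simp [List.getElem?_eq_getElem hjlt, hjc']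
    have hxk : (cs.drop s)[k]? = some '<' ∨ (cs.drop s)[k]? = some '&' ∨
        (cs.drop s)[k]? = some q := by
      have : (cs.drop s)[k] ∈ ['<', '&', q] := by simpa using hPk
      simp only [List.getElem?_eq_getElem hklt]
      simpa using this
    have hm : PySem.List.min?
        (([if PySem.Chars.find (cs.drop s) ['<'] = -1 then -1 else (s : Int) + PySem.Chars.find (cs.drop s) ['<'],
           if PySem.Chars.find (cs.drop s) ['&'] = -1 then -1 else (s : Int) + PySem.Chars.find (cs.drop s) ['&'],
           if PySem.Chars.find (cs.drop s) [q] = -1 then -1 else (s : Int) + PySem.Chars.find (cs.drop s) [q]]).filter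
          (fun p => p != -1)) (fun x => x) = some ((s : Int) + (k : Int)) := by
      apply pavMinFilter3
      · positivity
      · rcases hxk with hx | hx | hx
        · exact Or.inl (by rw [(key '<' (by simp)).2.1 hx, if_neg (by omega)])
        · exact Or.inr (Or.inl (by rw [(key '&' (by simp)).2.1 hx, if_neg (by omega)]))
        · exact Or.inr (Or.inr (by rw [(key q (by simp)).2.1 hx, if_neg (by omega)]))
      · rcases (key '<' (by simp)).1 with h | h
        · exact Or.inl (by simp [h])
        · right; rw [if_neg (by omega)]; omega
      · rcases (key '&' (by simp)).1 with h | h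
        · exact Or.inl (by simp [h])
        · right; rw [if_neg (by omega)]; omega
      · rcases (key q (by simp)).1 with h | h
        · exact Or.inl (by simp [h])
        · right; rw [if_neg (by omega)]; omega
    simp only [hm, Prod.mk.injEq]
    refine ⟨by trivial, ?_⟩
    -- ok bits agree
    by_cases hq : (cs.drop s)[k]? = some q
    · rw [(key q (by simp)).2.1 hq, if_neg (by omega)]
      simp [hq]
    · have hne : ¬ ((s : Int) + (k : Int)) =
          (if PySem.Chars.find (cs.drop s) [q] = -1 then -1
           else (s : Int) + PySem.Chars.find (cs.drop s) [q]) := by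
        rcases (key q (by simp)).1 with h | h
        · rw [if_pos h]; omega
        · rw [if_neg (by omega)]
          intro heq
          have : PySem.Chars.find (cs.drop s) [q] = (k : Int) := by omega
          exact hq ((key q (by simp)).2.2 this)
      rw [List.getElem?_drop] at hq
      simp [hne, hq]

-- lower bound for findFrom with a negative (wrapped) start
theorem pavFindFrom_lb (cs sub : List Char) (st : Int) (h1 : st < 0) (h2 : 0 ≤ st + cs.length) :
    PySem.Chars.findFrom cs sub st = -1 ∨ st + cs.length ≤ PySem.Chars.findFrom cs sub st := by
  have hr := PySem.Chars.neg_one_le_find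
    (List.drop (st + (cs.length : Int)).toNat (List.take ((cs.length : Int)).toNat cs)) sub
  simp only [PySem.Chars.findFrom, if_pos h1, if_neg (not_lt.mpr h2)]
  split_ifs with hb hc <;> omega

theorem pavStrFindFrom_lb (text sub : String) (st : Int) (h1 : st < 0)
    (h2 : 0 ≤ st + text.toList.length) :
    PySem.Str.findFrom text sub st = -1 ∨
      st + text.toList.length ≤ PySem.Str.findFrom text sub st := by
  rw [PySem.Str.findFrom_eq]
  exact pavFindFrom_lb text.toList sub.toList st h1 h2

-- if a delimiter sits at index K and the loop starts at or before K with enough fuel,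
-- the returned position is at most K + 1
theorem pavLoop_le (cs : List Char) (q : Char) (K : Nat) (hk : cs[K]? = some q) :
    ∀ (fuel : Nat) (cur : Int), -(cs.length : Int) ≤ cur → cur ≤ (K : Int) →
      (K : Int) - cur < (fuel : Int) → (pavLoop cs q cur fuel).1 ≤ (K : Int) + 1 := by
  have hKlt : K < cs.length := (List.getElem?_eq_some_iff.mp hk).1
  intro fuel
  induction fuel with
  | zero => intro cur h1 h2 h3; simp [pavLoop]; omega
  | succ f ih =>
    intro cur h1 h2 h3
    cases hg : PySem.List.pyGet? cs cur with
    | none =>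
      exfalso
      rw [PySem.List.pyGet?_eq_none_iff] at hg
      exact hg ⟨h1, by omega⟩
    | some c =>
      by_cases hbad : c ∈ ['<', '&', q]
      · simp [pavLoop, hg, hbad]; omega
      · have hcur : cur < (K : Int) := by
          rcases eq_or_lt_of_le h2 with he | hl
          · exfalso
            rw [he, PySem.List.pyGet?_natCast, hk] at hg
            have : c = q := by injection hg.symm
            simp [this] at hbad
          · exact hl
        have hstep : pavLoop cs q cur (f + 1) = pavLoop cs q (cur + 1) f := by
          simp [pavLoop, hg, hbad]
        rw [hstep]
        exact ih (cur + 1) (by omega) (by omega) (by omega)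

-- ===== VERDICT (by name: the statement is the Claim_ definition above) =====
theorem parse_attribute_value_spec : Claim_unchanged_parse_attribute_value := by
  intro text at_ hDom hPre
  unfold Spec_parse_attribute_value
  intro hnD
  obtain ⟨hlo, hhi⟩ := hPre
  rw [PySem.Str.len_eq] at hlo hhi
  cases hq : PySem.Str.pyGet? text at_ with
  | none =>
    exfalso
    rw [PySem.Str.pyGet?_eq, PySem.Chars.pyGet?_eq_listPyGet?,
      PySem.List.pyGet?_eq_none_iff] at hq
    exact hq ⟨by omega, hhi⟩
  | some quote =>
    simp only [parse_attribute_value, parse_attribute_value_alt, hq]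
    by_cases hqt : quote ∈ ['"', '\'']
    · rw [if_pos hqt, if_pos hqt]
      have hge : -1 ≤ at_ := by
        by_contra hh
        refine hnD ⟨by omega, ?_⟩
        rcases (by simpa using hqt : quote = '"' ∨ quote = '\'') with h | h
        · exact Or.inl (by rw [hq, h])
        · exact Or.inr (by rw [hq, h])
      have hcast : (((at_ + 1).toNat : Nat) : Int) = at_ + 1 := Int.toNat_of_nonneg (by omega)
      have hsle : (at_ + 1).toNat ≤ text.toList.length := by omega
      have hfuel : (PySem.Str.len text - (at_ + 1)).toNat = text.toList.length - (at_ + 1).toNat := by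
        rw [PySem.Str.len_eq]; omega
      have hpair := pavMain text.toList quote (at_ + 1).toNat hsle
      simp only [hcast] at hpair
      rw [hfuel, ← hpair]
      rw [PySem.Str.findFrom_eq, PySem.Str.findFrom_eq, PySem.Str.findFrom_eq,
        show ("<" : String).toList = ['<'] from rfl,
        show ("&" : String).toList = ['&'] from rfl,
        String.toList_singleton]
      cases hmv : PySem.List.min?
          (([PySem.Chars.findFrom text.toList ['<'] (at_ + 1),
             PySem.Chars.findFrom text.toList ['&'] (at_ + 1),
             PySem.Chars.findFrom text.toList [quote] (at_ + 1)]).filter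
            (fun p => p != -1)) (fun x => x) with
    | none => simp [PySem.Str.len_eq]
    | some i => simp
    · rw [if_neg hqt, if_neg hqt]
      have hnil : PySem.Str.slice text (some at_) (some at_) = "" := by
        rw [← String.toList_inj, PySem.Str.toList_slice, PySem.Chars.slice_eq_listSlice]
        have hlen := PySem.List.length_slice text.toList at_ at_
        have : (PySem.List.slice text.toList (some at_) (some at_)).length = 0 := by omega
        simpa using List.length_eq_zero_iff.mp this
      rw [hnil]

theorem parse_attribute_value_changed : Claim_changed_parse_attribute_value := by
  unfold Claim_changed_parse_attribute_value; decide

theorem parse_attribute_value_tight : Claim_exact_parse_attribute_value := by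
  unfold Claim_exact_parse_attribute_value
  intro text at_ hDom hPre hD heq
  obtain ⟨hlt, hquote⟩ := hD
  obtain ⟨hlo, hhi⟩ := hPre
  rw [PySem.Str.len_eq] at hlo hhi
  have hq : ∃ q, PySem.Str.pyGet? text at_ = some q ∧ (q = '"' ∨ q = '\'') := by
    rcases hquote with h | h
    · exact ⟨_, h, Or.inl rfl⟩
    · exact ⟨_, h, Or.inr rfl⟩
  obtain ⟨q, hq, hqv⟩ := hq
  have hqt : q ∈ ['"', '\''] := by rcases hqv with h | h <;> simp [h]
  simp only [parse_attribute_value, parse_attribute_value_alt, hq, if_pos hqt] at heq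
  -- the wrapped index of the quote character
  have hK0 : 0 < (-at_).toNat ∧ (-at_).toNat ≤ text.toList.length := by omega
  have hk : text.toList[text.toList.length - (-at_).toNat]? = some q := by
    have hpg := PySem.List.pyGet?_neg_natCast text.toList (-at_).toNat hK0.1 hK0.2
    rw [show -(((-at_).toNat : Nat) : Int) = at_ by omega] at hpg
    rw [PySem.Str.pyGet?_eq, PySem.Chars.pyGet?_eq_listPyGet?, hpg] at hq
    exact hq
  have hKi : ((text.toList.length - (-at_).toNat : Nat) : Int) = at_ + text.toList.length := by
    omega
  -- A's returned position is at most at_ + len + 1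
  have hA := pavLoop_le text.toList q _ hk ((PySem.Str.len text - (at_ + 1)).toNat) (at_ + 1)
    (by omega) (by omega) (by rw [PySem.Str.len_eq]; omega)
  rw [hKi] at hA
  -- B's returned position is at least at_ + len + 2 (or len)
  cases hmv : PySem.List.min?
      (([PySem.Str.findFrom text "<" (at_ + 1), PySem.Str.findFrom text "&" (at_ + 1),
         PySem.Str.findFrom text (String.singleton q) (at_ + 1)]).filter
        (fun p => p != -1)) (fun x => x) with
  | none =>
    rw [hmv] at heq
    have h2 := congrArg (fun t : String × Int × Bool => t.2.1) heq
    simp only [] at h2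
    have hlen := PySem.Str.len_eq text
    omega
  | some i =>
    rw [hmv] at heq
    have hi := PySem.List.min?_mem hmv
    rw [List.mem_filter] at hi
    obtain ⟨him, hine⟩ := hi
    have hine' : i ≠ -1 := by simpa using hine
    have hlb : at_ + 1 + text.toList.length ≤ i := by
      have h1 := pavStrFindFrom_lb text "<" (at_ + 1) (by omega) (by omega)
      have h2 := pavStrFindFrom_lb text "&" (at_ + 1) (by omega) (by omega)
      have h3 := pavStrFindFrom_lb text (String.singleton q) (at_ + 1) (by omega) (by omega)
      simp only [List.mem_cons, List.not_mem_nil, or_false] at him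
      rcases him with h | h | h <;> omega
    have h2 := congrArg (fun t : String × Int × Bool => t.2.1) heq
    simp only [] at h2
    omega
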